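-- pv_equiv track=rewrite | github.com/Linksy77/Python-Code | Lab10/life_starter/life.py | innerCells
-- ===== SOURCE A (Python) =====
-- def createOneRow(width):
--     """Returns one row of zeros of width "width"...
--        You should use this in your
--        createBoard(width, height) function."""
--     row = []
--     for col in range(width):
--         row += [0]
--     return row
--
-- def createBoard(width, height):
--     ''' Returns a 2D array with "height" rows and "width" cols '''
--     A = []
--     for row in range(height):
--         A += [createOneRow(width)]
--     return A
--
-- def innerCells(w, h):
--     ''' Returns an array of all live cells - with the
--         value 1 - except for a one-cell-wide border of
--         empty cells (with the value of 0) around the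
--         edge of the 2D array.'''
--     A = createBoard(w, h)
--     rowCount = 0
--     colCount = 0
--     for row in range(h):
--         colCount = 0
--         for col in range(w):
--             if (rowCount == 0 or colCount == 0) or (rowCount == h-1 or colCount == w-1):
--                 A[row][col] = 0
--             else:
--                 A[row][col] = 1
--             colCount += 1
--         rowCount += 1
--     return A
-- ===== SOURCE B (Python) =====
-- def innerCells(w, h):
--     ''' Assemble the board from whole-row patterns: a zero border row,
--         h-2 copies of the interior row [0] + [1]*(w-2) + [0], a zero
--         border row.  Degenerate boards (w<2 or h<2) have no interior
--         and are all-zero. '''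
--     if h < 2 or w < 2:
--         return [[0] * w for _ in range(h)]
--     zero = [0] * w
--     inner = [0] + [1] * (w - 2) + [0]
--     return [zero] + [list(inner) for _ in range(h - 2)] + [list(zero)]
-- ===== Notes on version B (the rewrite author's own statement) =====
-- stated objective: faster
-- what changed: B has no per-cell loop or border test: it assembles the board from whole-row patterns built by list multiplication (a zero border row, h-2 copies of [0]+[1]*(w-2)+[0], a zero border row), versus A's nested per-cell loop with rowCount/colCount counters and a four-way border conditional per cell.
import Mathlib
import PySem

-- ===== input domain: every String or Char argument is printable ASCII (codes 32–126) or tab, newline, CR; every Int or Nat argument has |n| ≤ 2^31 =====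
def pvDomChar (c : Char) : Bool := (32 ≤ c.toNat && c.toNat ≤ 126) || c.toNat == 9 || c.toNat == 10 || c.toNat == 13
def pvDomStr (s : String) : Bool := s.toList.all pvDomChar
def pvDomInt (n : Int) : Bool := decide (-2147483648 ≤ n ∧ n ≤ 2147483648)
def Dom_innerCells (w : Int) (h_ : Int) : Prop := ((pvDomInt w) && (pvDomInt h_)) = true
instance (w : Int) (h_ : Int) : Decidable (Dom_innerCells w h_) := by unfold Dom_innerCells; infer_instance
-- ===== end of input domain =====

-- B assembles the board from whole-row patterns (zero border row, h-2 copies of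
-- [0]+[1]*(w-2)+[0], zero border row) with no per-cell loop or border test;
-- A writes every cell through a nested loop with counters. Objective: faster (measured).
-- Equality proved for ALL inputs.

-- ===== PORT A =====
def createOneRow (width : Int) : List Int :=
  (PySem.List.pyRange 0 width 1).foldl (fun row _col => row ++ [0]) []

def createBoard (width height : Int) : List (List Int) :=
  (PySem.List.pyRange 0 height 1).foldl (fun A _row => A ++ [createOneRow width]) []

-- 'A[row][col] = v' is ported as List.set at row.toNat / col.toNat: exact here, since
-- row ∈ range(h), col ∈ range(w) are nonnegative and inside the h×w board, so Python
-- never raises and the indices never wrap.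
def innerCells (w : Int) (h_ : Int) : List (List Int) :=
  let A := createBoard w h_
  (((PySem.List.pyRange 0 h_ 1).foldl
      (fun (st : List (List Int) × Int × Int) row =>
        let inner :=
          (PySem.List.pyRange 0 w 1).foldl
            (fun (st2 : List (List Int) × Int) col =>
              (st2.1.set row.toNat ((st2.1.getD row.toNat []).set col.toNat
                 (if st.2.1 = 0 ∨ st2.2 = 0 ∨ st.2.1 = h_ - 1 ∨ st2.2 = w - 1 then 0 else 1)),
               st2.2 + 1))
            (st.1, 0)
        (inner.1, st.2.1 + 1, inner.2))
      (A, 0, 0)).1)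

-- ===== PORT B =====
-- '[0] * w' / '[1] * (w-2)' are List.replicate (empty for nonpositive count, as in
-- Python); 'for _ in range(n)' copies are a map over pyRange; list(x) copies are
-- the values themselves.
def innerCells_alt (w : Int) (h_ : Int) : List (List Int) :=
  if h_ < 2 ∨ w < 2 then
    (PySem.List.pyRange 0 h_ 1).map (fun _ => List.replicate w.toNat (0 : Int))
  else
    let zero := List.replicate w.toNat (0 : Int)
    let inner := (0 : Int) :: (List.replicate (w - 2).toNat 1 ++ [0])
    [zero] ++ (PySem.List.pyRange 0 (h_ - 2) 1).map (fun _ => inner) ++ [zero]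

-- ===== PRECONDITION & SPEC =====
def Spec_innerCells (w : Int) (h_ : Int) (out : List (List Int)) : Prop := out = innerCells_alt w h_
instance (w : Int) (h_ : Int) (out : List (List Int)) : Decidable (Spec_innerCells w h_ out) := by unfold Spec_innerCells; infer_instance

-- ===== CLAIM (what is proved, stated in full; the proofs are below) =====
def Claim_equal_innerCells : Prop := ∀ (w : Int) (h_ : Int), Dom_innerCells w h_ → Spec_innerCells w h_ (innerCells w h_)

-- ===== LEMMAS AND PROOFS =====

-- A's inner loop carries the colCount counter; it always equals the loop variable col.
lemma inner_counter (r : Nat) (f : Int → Int) (b : Int) :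
    ∀ (n : Nat) (a : Int) (B : List (List Int)), (b - a).toNat = n →
    (PySem.List.pyRange a b 1).foldl
       (fun (st2 : List (List Int) × Int) col =>
         (st2.1.set r ((st2.1.getD r []).set col.toNat (f st2.2)), st2.2 + 1))
       (B, a)
    = ((PySem.List.pyRange a b 1).foldl
        (fun C col => C.set r ((C.getD r []).set col.toNat (f col))) B,
       a + ((b - a).toNat : Int)) := by
  intro n
  induction n with
  | zero =>
    intro a B hn
    rw [PySem.List.pyRange_one_eq_nil (by omega)]
    simp [hn]
  | succ k ih =>
    intro a B hn
    rw [PySem.List.pyRange_one_cons (by omega)]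
    simp only [List.foldl_cons]
    rw [ih (a + 1) _ (by omega)]
    rw [Prod.mk.injEq]
    exact ⟨rfl, by omega⟩

-- A's outer loop carries (board, rowCount, colCount); rowCount always equals row,
-- colCount is dead (reset to 0 at each row).
lemma outer_counter (G : Int → Int → List (List Int) → List (List Int) × Int) (b : Int) :
    ∀ (n : Nat) (a cc : Int) (A : List (List Int)), (b - a).toNat = n →
    ((PySem.List.pyRange a b 1).foldl
       (fun (st : List (List Int) × Int × Int) row =>
         ((G row st.2.1 st.1).1, st.2.1 + 1, (G row st.2.1 st.1).2))
       (A, a, cc)).1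
    = (PySem.List.pyRange a b 1).foldl (fun B row => (G row row B).1) A := by
  intro n
  induction n with
  | zero =>
    intro a cc A hn
    rw [PySem.List.pyRange_one_eq_nil (by omega)]
    rfl
  | succ k ih =>
    intro a cc A hn
    rw [PySem.List.pyRange_one_cons (by omega)]
    simp only [List.foldl_cons]
    exact ih (a + 1) _ _ (by omega)

lemma set_getD_self (B : List (List Int)) (r : Nat) : B.set r (B.getD r []) = B := by
  by_cases h : r < B.length
  · rw [List.getD_eq_getElem B [] h]
    exact List.set_getElem_self h
  · exact List.set_eq_of_length_le (by omega)

lemma getD_set_self (B : List (List Int)) (r : Nat) (x : List Int) :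
    (B.set r x).getD r [] = if r < B.length then x else B.getD r [] := by
  by_cases h : r < B.length
  · simp [h]
  · simp [h, List.set_eq_of_length_le (by omega : B.length ≤ r)]

-- the column loop only ever touches row r of the board
lemma inner_to_row (v : Int → Int) (r : Nat) (b : Int) :
    ∀ (n : Nat) (a : Int) (B : List (List Int)), (b - a).toNat = n →
    (PySem.List.pyRange a b 1).foldl
      (fun C col => C.set r ((C.getD r []).set col.toNat (v col))) B
    = B.set r ((PySem.List.pyRange a b 1).foldl
        (fun row col => row.set col.toNat (v col)) (B.getD r [])) := by
  intro n
  induction n with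
  | zero =>
    intro a B hn
    rw [PySem.List.pyRange_one_eq_nil (by omega)]
    simp only [List.foldl_nil]
    exact (set_getD_self B r).symm
  | succ k ih =>
    intro a B hn
    rw [PySem.List.pyRange_one_cons (by omega)]
    simp only [List.foldl_cons]
    rw [ih (a + 1) _ (by omega), getD_set_self]
    by_cases h : r < B.length
    · simp [h, List.set_set]
    · simp [h, List.set_eq_of_length_le (by omega : B.length ≤ r)]

-- a fold writing F i (old value) at every index i ∈ [a, b) is a guarded mapIdx
lemma set_range_fold {α : Type} (F : Int → α → α) (d : α) (b : Int) :
    ∀ (n : Nat) (a : Int) (xs : List α), (b - a).toNat = n → 0 ≤ a →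
    (PySem.List.pyRange a b 1).foldl
      (fun ys i => ys.set i.toNat (F i (ys.getD i.toNat d))) xs
    = xs.mapIdx (fun i x => if a ≤ (i : Int) ∧ (i : Int) < b then F i x else x) := by
  intro n
  induction n with
  | zero =>
    intro a xs hn ha
    rw [PySem.List.pyRange_one_eq_nil (by omega)]
    simp only [List.foldl_nil]
    apply List.ext_getElem (by simp)
    intro i h1 h2
    rw [List.getElem_mapIdx]
    rw [if_neg (by omega)]
  | succ k ih =>
    intro a xs hn ha
    rw [PySem.List.pyRange_one_cons (by omega)]
    simp only [List.foldl_cons]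
    rw [ih (a + 1) _ (by omega) (by omega)]
    apply List.ext_getElem (by simp)
    intro i h1 h2
    have hi : i < xs.length := by simpa using h2
    rw [List.getElem_mapIdx, List.getElem_mapIdx, List.getElem_set]
    by_cases hia : a.toNat = i
    · subst hia
      have ha' : ((a.toNat : Nat) : Int) = a := by omega
      rw [if_pos rfl, if_neg (by omega), if_pos (by omega),
        List.getD_eq_getElem xs d (by omega), ha']
    · rw [if_neg hia]
      by_cases hin : a + 1 ≤ (i : Int) ∧ (i : Int) < b
      · rw [if_pos hin, if_pos (by omega)]
      · rw [if_neg hin, if_neg (by omega)]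

lemma createOneRow_eq (w : Int) : createOneRow w = List.replicate w.toNat 0 := by
  have h := PySem.List.foldl_append_singleton_eq_map (fun _ => (0 : Int))
    (PySem.List.pyRange 0 w 1) []
  simpa [createOneRow, List.map_const', PySem.List.length_pyRange_one] using h

lemma createBoard_eq (w h_ : Int) :
    createBoard w h_ = List.replicate h_.toNat (List.replicate w.toNat 0) := by
  have h := PySem.List.foldl_append_singleton_eq_map (fun _ : Int => createOneRow w)
    (PySem.List.pyRange 0 h_ 1) []
  simpa [createBoard, createOneRow_eq, List.map_const', PySem.List.length_pyRange_one] using h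

-- no-read special case of set_range_fold (the loops write values not depending on the old cell)
lemma set_range_fold' {α : Type} (v : Int → α) (d : α) (b : Int)
    (n : Nat) (a : Int) (xs : List α) (hn : (b - a).toNat = n) (ha : 0 ≤ a) :
    (PySem.List.pyRange a b 1).foldl (fun ys i => ys.set i.toNat (v i)) xs
    = xs.mapIdx (fun i x => if a ≤ (i : Int) ∧ (i : Int) < b then v i else x) :=
  set_range_fold (fun i _ => v i) d b n a xs hn ha

-- A as a closed per-cell description: an h×w board whose (r,c) cell is 0 on the
-- border and 1 inside.
lemma innerCells_closed (w h_ : Int) :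
    innerCells w h_ =
      (List.replicate h_.toNat (List.replicate w.toNat 0)).mapIdx
        (fun r x => if 0 ≤ (r : Int) ∧ (r : Int) < h_ then
          x.mapIdx (fun c y => if 0 ≤ (c : Int) ∧ (c : Int) < w then
            (if (r : Int) = 0 ∨ (c : Int) = 0 ∨ (r : Int) = h_ - 1 ∨ (c : Int) = w - 1
             then (0:Int) else 1) else y) else x) := by
  unfold innerCells
  rw [createBoard_eq]
  rw [outer_counter
    (fun row rc A =>
      (PySem.List.pyRange 0 w 1).foldl
        (fun (st2 : List (List Int) × Int) col =>
          (st2.1.set row.toNat ((st2.1.getD row.toNat []).set col.toNat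
             (if rc = 0 ∨ st2.2 = 0 ∨ rc = h_ - 1 ∨ st2.2 = w - 1 then 0 else 1)),
           st2.2 + 1))
        (A, 0)) h_ (h_ - 0).toNat 0 0 _ rfl]
  have hcnt : ∀ (row : Int) (B : List (List Int)),
      (PySem.List.pyRange 0 w 1).foldl
        (fun (st2 : List (List Int) × Int) col =>
          (st2.1.set row.toNat ((st2.1.getD row.toNat []).set col.toNat
             (if row = 0 ∨ st2.2 = 0 ∨ row = h_ - 1 ∨ st2.2 = w - 1 then 0 else 1)),
           st2.2 + 1))
        (B, 0)
      = ((PySem.List.pyRange 0 w 1).foldl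
          (fun C col => C.set row.toNat ((C.getD row.toNat []).set col.toNat
             (if row = 0 ∨ col = 0 ∨ row = h_ - 1 ∨ col = w - 1 then 0 else 1))) B,
         0 + (((w - 0).toNat : Nat) : Int)) := fun row B =>
    inner_counter row.toNat
      (fun cc => if row = 0 ∨ cc = 0 ∨ row = h_ - 1 ∨ cc = w - 1 then (0:Int) else 1)
      w (w - 0).toNat 0 B rfl
  simp only [hcnt]
  have hrow : ∀ (row : Int) (B : List (List Int)),
      (PySem.List.pyRange 0 w 1).foldl
        (fun C col => C.set row.toNat ((C.getD row.toNat []).set col.toNat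
           (if row = 0 ∨ col = 0 ∨ row = h_ - 1 ∨ col = w - 1 then 0 else 1))) B
      = B.set row.toNat ((PySem.List.pyRange 0 w 1).foldl
          (fun r col => r.set col.toNat
             (if row = 0 ∨ col = 0 ∨ row = h_ - 1 ∨ col = w - 1 then 0 else 1))
          (B.getD row.toNat [])) := fun row B =>
    inner_to_row (fun col => if row = 0 ∨ col = 0 ∨ row = h_ - 1 ∨ col = w - 1 then (0:Int) else 1)
      row.toNat w (w - 0).toNat 0 B rfl
  simp only [hrow]
  have hcols : ∀ (row : Int) (xs : List Int),
      (PySem.List.pyRange 0 w 1).foldl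
        (fun r col => r.set col.toNat
           (if row = 0 ∨ col = 0 ∨ row = h_ - 1 ∨ col = w - 1 then 0 else 1)) xs
      = xs.mapIdx (fun c y => if 0 ≤ (c : Int) ∧ (c : Int) < w then
          (if row = 0 ∨ (c : Int) = 0 ∨ row = h_ - 1 ∨ (c : Int) = w - 1 then 0 else 1)
          else y) := fun row xs =>
    set_range_fold'
      (fun col => if row = 0 ∨ col = 0 ∨ row = h_ - 1 ∨ col = w - 1 then (0:Int) else 1)
      0 w (w - 0).toNat 0 xs rfl (by omega)
  simp only [hcols]
  exact set_range_fold
    (fun row x => x.mapIdx (fun c y => if 0 ≤ (c : Int) ∧ (c : Int) < w then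
      (if row = 0 ∨ (c : Int) = 0 ∨ row = h_ - 1 ∨ (c : Int) = w - 1 then (0:Int) else 1)
      else y))
    [] h_ (h_ - 0).toNat 0 _ rfl (by omega)

-- ===== VERDICT (by name: the statement is the Claim_ definition above) =====
theorem innerCells_spec : Claim_equal_innerCells := by
  intro w h_ _
  unfold Spec_innerCells
  rw [innerCells_closed]
  unfold innerCells_alt
  simp only []
  by_cases hdeg : h_ < 2 ∨ w < 2
  · rw [if_pos hdeg]
    have hm : (PySem.List.pyRange 0 h_ 1).map (fun _ => List.replicate w.toNat (0:Int))
        = List.replicate h_.toNat (List.replicate w.toNat 0) := by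
      simp [List.map_const', PySem.List.length_pyRange_one]
    rw [hm]
    apply List.ext_getElem (by simp)
    intro r hr1 hr2
    have hr : r < h_.toNat := by simpa using hr1
    rw [List.getElem_mapIdx, List.getElem_replicate,
      if_pos (by omega : 0 ≤ (r : Int) ∧ (r : Int) < h_)]
    apply List.ext_getElem (by simp)
    intro c hc1 hc2
    have hc : c < w.toNat := by simpa using hc1
    rw [List.getElem_mapIdx, List.getElem_replicate,
      if_pos (by omega : 0 ≤ (c : Int) ∧ (c : Int) < w),
      if_pos (by omega)]
  · rw [if_neg hdeg]
    have hh : 2 ≤ h_ := by omega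
    have hw : 2 ≤ w := by omega
    have hmap : (PySem.List.pyRange 0 (h_ - 2) 1).map
        (fun _ => (0:Int) :: (List.replicate (w - 2).toNat 1 ++ [0]))
        = List.replicate (h_ - 2).toNat ((0:Int) :: (List.replicate (w - 2).toNat 1 ++ [0])) := by
      simp [List.map_const', PySem.List.length_pyRange_one]
    rw [hmap]
    -- row-level comparison
    have hinner : ∀ (r : Nat), (r : Int) = 0 ∨ (r : Int) = h_ - 1 →
        (List.replicate w.toNat (0:Int)).mapIdx
          (fun c y => if 0 ≤ (c : Int) ∧ (c : Int) < w then
            (if (r : Int) = 0 ∨ (c : Int) = 0 ∨ (r : Int) = h_ - 1 ∨ (c : Int) = w - 1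
             then (0:Int) else 1) else y)
        = List.replicate w.toNat 0 := by
      intro r hr
      apply List.ext_getElem (by simp)
      intro c hc1 hc2
      have hc : c < w.toNat := by simpa using hc1
      rw [List.getElem_mapIdx, List.getElem_replicate,
        if_pos (by omega : 0 ≤ (c : Int) ∧ (c : Int) < w), if_pos (by tauto)]
    have hmid : ∀ (r : Nat), 1 ≤ (r : Int) → (r : Int) < h_ - 1 →
        (List.replicate w.toNat (0:Int)).mapIdx
          (fun c y => if 0 ≤ (c : Int) ∧ (c : Int) < w then
            (if (r : Int) = 0 ∨ (c : Int) = 0 ∨ (r : Int) = h_ - 1 ∨ (c : Int) = w - 1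
             then (0:Int) else 1) else y)
        = (0:Int) :: (List.replicate (w - 2).toNat 1 ++ [0]) := by
      intro r hr1 hr2
      apply List.ext_getElem (by simp; omega)
      intro c hc1 hc2
      have hc : c < w.toNat := by simpa using hc1
      rw [List.getElem_mapIdx, List.getElem_replicate,
        if_pos (by omega : 0 ≤ (c : Int) ∧ (c : Int) < w)]
      rcases Nat.eq_zero_or_pos c with hc0 | hcpos
      · subst hc0
        simp
      · obtain ⟨k, rfl⟩ := Nat.exists_eq_succ_of_ne_zero (by omega : c ≠ 0)
        show _ = ((List.replicate (w - 2).toNat (1:Int) ++ [0])[k]'(by simp at hc2 ⊢; omega))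
        by_cases hk : k < (w - 2).toNat
        · rw [List.getElem_append_left (by simpa using hk), List.getElem_replicate,
            if_neg (by push_cast; omega)]
        · have hkw : k = (w - 2).toNat := by simp at hc2; omega
          rw [List.getElem_append_right (by simpa using hk)]
          simp only [List.length_replicate, hkw]
          rw [if_pos (by push_cast; omega)]
          simp
    -- board-level comparison
    apply List.ext_getElem (by simp; omega)
    intro r hr1 hr2
    have hr : r < h_.toNat := by simpa using hr1
    rw [List.getElem_mapIdx, List.getElem_replicate,
      if_pos (by omega : 0 ≤ (r : Int) ∧ (r : Int) < h_)]
    rcases Nat.eq_zero_or_pos r with hr0 | hrpos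
    · subst hr0
      rw [hinner 0 (Or.inl (by simp))]
      rfl
    · obtain ⟨k, rfl⟩ := Nat.exists_eq_succ_of_ne_zero (by omega : r ≠ 0)
      show _ = ((List.replicate (h_ - 2).toNat ((0:Int) :: (List.replicate (w - 2).toNat 1 ++ [0]))
          ++ [List.replicate w.toNat 0])[k]'(by simp at hr2 ⊢; omega))
      by_cases hk : k < (h_ - 2).toNat
      · rw [List.getElem_append_left (by simpa using hk), List.getElem_replicate]
        exact hmid (k + 1) (by push_cast; omega) (by push_cast; omega)
      · have hkh : k = (h_ - 2).toNat := by omega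
        rw [List.getElem_append_right (by simpa using hk)]
        rw [hinner (k + 1) (Or.inr (by push_cast; omega))]
        simp [hkh]
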